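-- pv_equiv track=rewrite | github.com/gnekt/ModelAndLanguagesForBioInformatics | Python/List/28.pack.py | transfer
-- ===== SOURCE A (Python) =====
-- def transfer(i_list,target):
--     i=0
--     _shallow1 = []
--     _shallow2 = []
--     done = False
--     while i < len(i_list):
--         if i_list[i] != target or done:
--             _shallow2.append(i_list[i])
--             i+=1
--             continue
--         else:
--             _shallow1.append(i_list[i])
--             j=i+1
--             while j < len(i_list) and i_list[j] == target:
--                 _shallow1.append(i_list[j])
--                 j=j+1
--             done = True
--         i=j
--     return _shallow1,_shallow2
-- ===== SOURCE B (Python) =====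
-- def transfer(i_list, target):
--     n = len(i_list)
--     start = 0
--     while start < n and i_list[start] != target:
--         start += 1
--     end = start
--     while end < n and i_list[end] == target:
--         end += 1
--     return i_list[start:end], i_list[:start] + i_list[end:]
-- ===== Notes on version B (the rewrite author's own statement) =====
-- stated objective: simpler
-- what changed: Replaced A's single interleaved loop (inner run-collection loop, done flag, element-by-element appends to two accumulators) by two boundary scans locating the first run of target and three slices building both outputs.
import Mathlib
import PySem

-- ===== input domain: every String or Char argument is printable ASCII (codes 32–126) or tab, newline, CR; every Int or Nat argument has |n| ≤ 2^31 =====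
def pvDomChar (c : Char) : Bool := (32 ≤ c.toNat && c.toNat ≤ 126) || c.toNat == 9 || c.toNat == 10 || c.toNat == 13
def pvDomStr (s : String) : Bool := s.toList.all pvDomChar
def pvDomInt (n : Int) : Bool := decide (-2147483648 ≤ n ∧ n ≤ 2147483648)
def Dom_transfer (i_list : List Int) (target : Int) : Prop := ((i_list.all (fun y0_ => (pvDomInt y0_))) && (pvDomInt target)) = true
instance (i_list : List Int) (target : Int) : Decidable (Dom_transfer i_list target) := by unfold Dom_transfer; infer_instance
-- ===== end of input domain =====

-- B replaces A's interleaved append loop (outer scan + inner run loop + done flag)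
-- by two boundary scans for the first run of `target` followed by three slices; objective: simpler.

-- ===== PORT A =====
-- The while loops walk an index over i_list; each is ported as the obvious structural
-- recursion over the remaining suffix (r stands for i_list[i:]) with the same accumulators.
-- inner loop: `while j < len(i_list) and i_list[j] == target: _shallow1.append(i_list[j]); j += 1`
-- returns the remaining suffix (i_list[j:]) and the grown _shallow1
def transferInner (t : Int) (r : List Int) (s1 : List Int) : List Int × List Int :=
  match r with
  | [] => ([], s1)
  | x :: rest => if x = t then transferInner t rest (s1 ++ [x]) else (x :: rest, s1)

-- the outer loop once done == True: its test `i_list[i] != target or done` always succeeds,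
-- so every remaining element is appended to _shallow2
def transferDone (s1 s2 : List Int) (r : List Int) : List Int × List Int :=
  match r with
  | [] => (s1, s2)
  | x :: rest => transferDone s1 (s2 ++ [x]) rest

-- the outer loop while done == False
def transferScan (t : Int) (s1 s2 : List Int) (r : List Int) : List Int × List Int :=
  match r with
  | [] => (s1, s2)
  | x :: rest =>
      if x ≠ t then transferScan t s1 (s2 ++ [x]) rest
      else
        let p := transferInner t rest (s1 ++ [x])
        transferDone p.2 s2 p.1

def transfer (i_list : List Int) (target : Int) : List Int × List Int :=
  transferScan target [] [] i_list

-- ===== PORT B =====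
-- `while start < n and i_list[start] != target: start += 1` (r stands for i_list[s:])
def scanNe (t : Int) (r : List Int) (s : Nat) : Nat :=
  match r with
  | [] => s
  | x :: rest => if x ≠ t then scanNe t rest (s+1) else s

-- `while end < n and i_list[end] == target: end += 1` (r stands for i_list[e:])
def scanEq (t : Int) (r : List Int) (e : Nat) : Nat :=
  match r with
  | [] => e
  | x :: rest => if x = t then scanEq t rest (e+1) else e

def transfer_alt (i_list : List Int) (target : Int) : List Int × List Int :=
  let start := scanNe target i_list 0
  let stop := scanEq target (i_list.drop start) start
  (PySem.List.slice i_list (some (start : Int)) (some (stop : Int)),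
   PySem.List.slice i_list none (some (start : Int)) ++
     PySem.List.slice i_list (some (stop : Int)) none)

-- ===== PRECONDITION & SPEC =====
def Spec_transfer (i_list : List Int) (target : Int) (out : List Int × List Int) : Prop := out = transfer_alt i_list target
instance (i_list : List Int) (target : Int) (out : List Int × List Int) : Decidable (Spec_transfer i_list target out) := by unfold Spec_transfer; infer_instance

-- ===== CLAIM (what is proved, stated in full; the proofs are below) =====
def Claim_equal_transfer : Prop := ∀ (i_list : List Int) (target : Int), Dom_transfer i_list target → Spec_transfer i_list target (transfer i_list target)

-- ===== LEMMAS AND PROOFS =====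

theorem transferDone_eq (s1 s2 r : List Int) :
    transferDone s1 s2 r = (s1, s2 ++ r) := by
  induction r generalizing s2 with
  | nil => simp [transferDone]
  | cons x rest ih => simp [transferDone, ih]

theorem transferInner_eq (t : Int) (r s1 : List Int) :
    transferInner t r s1 =
      (r.dropWhile (fun x => decide (x = t)), s1 ++ r.takeWhile (fun x => decide (x = t))) := by
  induction r generalizing s1 with
  | nil => simp [transferInner]
  | cons x rest ih =>
    by_cases hx : x = t
    · simp [transferInner, hx, ih]
    · simp [transferInner, hx]

theorem transferScan_eq (t : Int) (r s1 s2 : List Int) :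
    transferScan t s1 s2 r =
      (s1 ++ (r.dropWhile (fun x => !decide (x = t))).takeWhile (fun x => decide (x = t)),
       s2 ++ r.takeWhile (fun x => !decide (x = t)) ++
         (r.dropWhile (fun x => !decide (x = t))).dropWhile (fun x => decide (x = t))) := by
  induction r generalizing s1 s2 with
  | nil => simp [transferScan]
  | cons x rest ih =>
    by_cases hx : x = t
    · simp [transferScan, hx, transferInner_eq, transferDone_eq]
    · simp [transferScan, hx, ih]

theorem scanNe_eq (t : Int) (r : List Int) (s : Nat) :
    scanNe t r s = s + (r.takeWhile (fun x => !decide (x = t))).length := by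
  induction r generalizing s with
  | nil => simp [scanNe]
  | cons x rest ih =>
    by_cases hx : x = t
    · simp [scanNe, hx]
    · simp [scanNe, hx, ih]
      omega

theorem scanEq_eq (t : Int) (r : List Int) (e : Nat) :
    scanEq t r e = e + (r.takeWhile (fun x => decide (x = t))).length := by
  induction r generalizing e with
  | nil => simp [scanEq]
  | cons x rest ih =>
    by_cases hx : x = t
    · simp [scanEq, hx, ih]
      omega
    · simp [scanEq, hx]

-- ===== VERDICT (by name: the statement is the Claim_ definition above) =====
theorem transfer_spec : Claim_equal_transfer := by
  intro xs t _
  unfold Spec_transfer transfer transfer_alt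
  -- names for the three segments: pre = leading non-target part, w = first run, post = the rest
  set p : Int → Bool := fun x => !decide (x = t) with hp
  set q : Int → Bool := fun x => decide (x = t) with hq
  set pre := xs.takeWhile p with hpre
  set mid := xs.dropWhile p with hmid
  set w := mid.takeWhile q with hw
  set post := mid.dropWhile q with hpost
  have hxs : pre ++ mid = xs := List.takeWhile_append_dropWhile
  have hmidsplit : w ++ post = mid := List.takeWhile_append_dropWhile
  have hstart : scanNe t xs 0 = pre.length := by
    rw [scanNe_eq]; simp [hpre, hp]
  have hdropstart : xs.drop pre.length = mid := by
    conv_lhs => rw [← hxs]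
    simp
  have hstop : scanEq t (xs.drop (scanNe t xs 0)) (scanNe t xs 0) = pre.length + w.length := by
    rw [hstart, hdropstart, scanEq_eq, hw, hq]
  rw [transferScan_eq]
  simp only [List.nil_append, ← hp, ← hq, ← hpre, ← hmid, ← hw, ← hpost]
  rw [hstop, hstart]
  have h1 : PySem.List.slice xs (some (pre.length : Int)) (some ((pre.length + w.length : Nat) : Int))
      = w := by
    rw [PySem.List.slice_natCast, hdropstart]
    have : pre.length + w.length - pre.length = w.length := by omega
    rw [this]
    conv_lhs => rw [← hmidsplit]
    simp
  have h2 : PySem.List.slice xs none (some ((pre.length : Nat) : Int)) = pre := by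
    rw [PySem.List.slice_to_natCast]
    conv_lhs => rw [← hxs]
    simp
  have h3 : PySem.List.slice xs (some ((pre.length + w.length : Nat) : Int)) none = post := by
    rw [PySem.List.slice_from_natCast]
    conv_lhs => rw [← hxs, ← hmidsplit]
    rw [← List.append_assoc]
    have : pre.length + w.length = (pre ++ w).length := by simp
    rw [this, List.drop_left]
  rw [h1, h2, h3]
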